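-- pv_equiv track=rewrite | github.com/jshumaker/LoA | utility/screen.py | search_offset
-- ===== SOURCE A (Python) =====
-- def search_offset(radius=2, offsetx=0, offsety=0):
--     """
--     :param radius: Search radius, max distance from 0,0 to generate a point from. Defaults to 2, which will generate
--      a -2, -2 to 2, 2 search pattern spiraling out from center.
--     :return: Yields a x,y tuplet in a spiral sequence from 0,0 limited by radius.
--     :offsetx: amount to offset returned x by.
--     :offsety: amount to offset returned x by.
--     """
--     x = y = 0
--     dx = 0
--     dy = -1
--     for i in range((radius*2 + 1)**2):
--         yield (x + offsetx, y + offsety)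
--         if x == y or (x < 0 and x == -y) or (x > 0 and x == 1-y):
--             dx, dy = -dy, dx
--         x, y = x+dx, y+dy
-- ===== SOURCE B (Python) =====
-- def search_offset(radius=2, offsetx=0, offsety=0):
--     """Spiral by run-lengths: emit center, then segments of length 1,1,2,2,3,3,...
--     in directions right, up, left, down, truncating at (radius*2+1)**2 points."""
--     total = (radius*2 + 1)**2
--     yield (offsetx, offsety)
--     count = 1
--     x = y = 0
--     seglen = 1
--     dirs = ((1, 0), (0, 1), (-1, 0), (0, -1))
--     d = 0
--     while count < total:
--         dx, dy = dirs[d]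
--         for _ in range(min(seglen, total - count)):
--             x += dx
--             y += dy
--             yield (x + offsetx, y + offsety)
--             count += 1
--         if d % 2 == 1:
--             seglen += 1
--         d = (d + 1) % 4
-- ===== Notes on version B (the rewrite author's own statement) =====
-- stated objective: alternative
-- what changed: Replaced the per-step corner test inside a single (2r+1)^2-iteration loop by a run-length decomposition: a direction index cycling right/up/left/down and segment lengths 1,1,2,2,3,3,... emitted wholesale, truncating the last segment at the total count.
import Mathlib
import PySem

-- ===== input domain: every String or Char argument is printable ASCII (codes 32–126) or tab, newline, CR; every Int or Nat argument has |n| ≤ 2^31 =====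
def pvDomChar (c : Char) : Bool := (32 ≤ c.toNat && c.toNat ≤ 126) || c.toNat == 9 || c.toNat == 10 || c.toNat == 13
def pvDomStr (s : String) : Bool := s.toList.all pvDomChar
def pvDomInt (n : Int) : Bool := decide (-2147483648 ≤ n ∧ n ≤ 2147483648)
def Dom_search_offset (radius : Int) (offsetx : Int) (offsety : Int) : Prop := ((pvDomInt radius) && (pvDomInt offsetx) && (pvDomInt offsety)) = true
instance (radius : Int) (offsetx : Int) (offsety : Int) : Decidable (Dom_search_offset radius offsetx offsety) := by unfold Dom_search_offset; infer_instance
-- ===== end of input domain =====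

-- B restructures A's per-step corner test into run-length segments (alternative decomposition, same cost);
-- both ports return the list of points the Python generators yield.

-- ===== PORT A =====
-- the turn test `x == y or (x < 0 and x == -y) or (x > 0 and x == 1-y)`
def condA (x y : Int) : Bool :=
  decide (x = y) || (decide (x < 0) && decide (x = -y)) || (decide (0 < x) && decide (x = 1 - y))

-- the `for i in range(n)` loop: yield, maybe turn, step
def stepsA (ox oy : Int) : Nat → Int → Int → Int → Int → List (Int × Int)
  | 0, _, _, _, _ => []
  | n + 1, x, y, dx, dy =>
    (x + ox, y + oy) ::
      (let p := if condA x y then (-dy, dx) else (dx, dy)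
       stepsA ox oy n (x + p.1) (y + p.2) p.1 p.2)

def search_offset (radius : Int) (offsetx : Int) (offsety : Int) : List (Int × Int) :=
  stepsA offsetx offsety ((radius * 2 + 1) ^ 2).toNat 0 0 0 (-1)

-- ===== PORT B =====
-- the direction table
def dirsB (d : Nat) : Int × Int :=
  match d with
  | 0 => (1, 0)
  | 1 => (0, 1)
  | 2 => (-1, 0)
  | _ => (0, -1)

-- the inner `for _ in range(s)` loop: step and yield s times; returns the yielded points and final x, y
def runB (ox oy dx dy : Int) : Nat → Int → Int → List (Int × Int) × Int × Int
  | 0, x, y => ([], x, y)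
  | s + 1, x, y =>
    let x' := x + dx
    let y' := y + dy
    let r := runB ox oy dx dy s x' y'
    ((x' + ox, y' + oy) :: r.1, r.2)

-- the `while count < total` loop; `rem` is total - count; fuel only makes the recursion structural
def goB (ox oy : Int) : Nat → Nat → Int → Int → Nat → Nat → List (Int × Int)
  | 0, _, _, _, _, _ => []
  | fuel + 1, rem, x, y, d, len =>
    if rem = 0 then []
    else
      let dxy := dirsB d
      let s := min len rem
      let r := runB ox oy dxy.1 dxy.2 s x y
      r.1 ++ goB ox oy fuel (rem - s) r.2.1 r.2.2 ((d + 1) % 4) (if d % 2 = 1 then len + 1 else len)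

def search_offset_alt (radius : Int) (offsetx : Int) (offsety : Int) : List (Int × Int) :=
  let total := (radius * 2 + 1) ^ 2
  let rem := total.toNat - 1
  (offsetx, offsety) :: goB offsetx offsety rem rem 0 0 0 1

-- ===== PRECONDITION & SPEC =====
def Spec_search_offset (radius : Int) (offsetx : Int) (offsety : Int) (out : List (Int × Int)) : Prop := out = search_offset_alt radius offsetx offsety
instance (radius : Int) (offsetx : Int) (offsety : Int) (out : List (Int × Int)) : Decidable (Spec_search_offset radius offsetx offsety out) := by unfold Spec_search_offset; infer_instance

-- ===== CLAIM (what is proved, stated in full; the proofs are below) =====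
def Claim_equal_search_offset : Prop := ∀ (radius : Int) (offsetx : Int) (offsety : Int), Dom_search_offset radius offsetx offsety → Spec_search_offset radius offsetx offsety (search_offset radius offsetx offsety)

-- ===== LEMMAS AND PROOFS =====

theorem runB_end (ox oy dx dy : Int) : ∀ (s : Nat) (x y : Int),
    (runB ox oy dx dy s x y).2 = (x + s * dx, y + s * dy) := by
  intro s
  induction s with
  | zero => intro x y; simp [runB]
  | succ n ih =>
    intro x y
    simp only [runB, ih, Prod.mk.injEq]
    constructor <;> push_cast <;> ring

theorem goB_zero (ox oy : Int) (fuel : Nat) (x y : Int) (d len : Nat) :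
    goB ox oy fuel 0 x y d len = [] := by
  cases fuel <;> simp [goB]

-- goB does not depend on the fuel as long as it covers rem (each segment consumes ≥ 1)
theorem goB_fuel (ox oy : Int) : ∀ (rem fuel fuel' : Nat) (x y : Int) (d len : Nat),
    1 ≤ len → rem ≤ fuel → rem ≤ fuel' →
    goB ox oy fuel rem x y d len = goB ox oy fuel' rem x y d len := by
  intro rem
  induction rem using Nat.strong_induction_on with
  | _ rem ih =>
    intro fuel fuel' x y d len hlen hf hf'
    cases rem with
    | zero => rw [goB_zero, goB_zero]
    | succ r =>
      cases fuel with
      | zero => omega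
      | succ f =>
        cases fuel' with
        | zero => omega
        | succ f' =>
          simp only [goB, if_neg (Nat.succ_ne_zero r)]
          have hs : 1 ≤ min len (r + 1) := by omega
          congr 1
          exact ih (r + 1 - min len (r + 1)) (by omega) f f' _ _ _ _
            (by split <;> omega) (by omega) (by omega)

-- A runs one straight segment: from the point after a corner, it emits the next `min L rem`
-- spiral points and, if rem exceeds the segment, resumes at the next corner with direction rotated
theorem segA (ox oy : Int) : ∀ (L : Nat) (x y dx dy : Int) (rem : Nat),
    1 ≤ L →
    (∀ i : Nat, 1 ≤ i → i < L → condA (x + i * dx) (y + i * dy) = false) →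
    condA (x + L * dx) (y + L * dy) = true →
    stepsA ox oy rem (x + dx) (y + dy) dx dy =
      (runB ox oy dx dy (min L rem) x y).1 ++
        stepsA ox oy (rem - L) (x + L * dx - dy) (y + L * dy + dx) (-dy) dx := by
  intro L
  induction L with
  | zero => intro x y dx dy rem h1; omega
  | succ L ih =>
    intro x y dx dy rem _ hmid hend
    cases rem with
    | zero => simp [stepsA, runB]
    | succ r =>
      by_cases hL0 : L = 0
      · subst hL0
        have hc : condA (x + dx) (y + dy) = true := by
          have := hend; push_cast at this; simpa using this
        have hmin : min (0 + 1) (r + 1) = 1 := by omega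
        simp only [stepsA, hc, if_true, Nat.succ_sub_succ, Nat.sub_zero, hmin,
          runB, List.cons_append, List.nil_append]
        have hx : x + dx + -dy = x + ((0 : Nat) + 1 : Nat) * dx - dy := by push_cast; ring
        have hy : y + dy + dx = y + ((0 : Nat) + 1 : Nat) * dy + dx := by push_cast; ring
        rw [hx, hy]
      · have hc : condA (x + dx) (y + dy) = false := by
          have := hmid 1 (le_refl 1) (by omega); push_cast at this; simpa using this
        have hmid' : ∀ i : Nat, 1 ≤ i → i < L →
            condA (x + dx + i * dx) (y + dy + i * dy) = false := by
          intro i h1 h2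
          have := hmid (i + 1) (by omega) (by omega)
          have ex : x + ((i : Int) + 1) * dx = x + dx + i * dx := by ring
          have ey : y + ((i : Int) + 1) * dy = y + dy + i * dy := by ring
          push_cast at this; rw [ex, ey] at this; exact this
        have hend' : condA (x + dx + L * dx) (y + dy + L * dy) = true := by
          have := hend
          have ex : x + ((L : Int) + 1) * dx = x + dx + L * dx := by ring
          have ey : y + ((L : Int) + 1) * dy = y + dy + L * dy := by ring
          push_cast at this; rw [ex, ey] at this; exact this
        have ihr := ih (x + dx) (y + dy) dx dy r (by omega) hmid' hend'
        simp only [stepsA, hc, if_false, Bool.false_eq_true]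
        have hstep : stepsA ox oy r (x + dx + dx) (y + dy + dy) dx dy =
            (runB ox oy dx dy (min L r) (x + dx) (y + dy)).1 ++
              stepsA ox oy (r - L) (x + dx + L * dx - dy) (y + dy + L * dy + dx) (-dy) dx := ihr
        rw [hstep]
        have hmin : min (L + 1) (r + 1) = min L r + 1 := by omega
        rw [hmin]
        simp only [runB, List.cons_append, Nat.succ_sub_succ]
        have ex : x + dx + (L : Int) * dx - dy = x + ((L : Nat) + 1 : Nat) * dx - dy := by
          push_cast; ring
        have ey : y + dy + (L : Int) * dy + dx = y + ((L : Nat) + 1 : Nat) * dy + dx := by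
          push_cast; ring
        rw [ex, ey]

-- one goB segment = one A segment: given the corner characterisation of condA along the
-- segment and the equivalence at the next corner, extend it across this segment
theorem chainStep (ox oy : Int) (L : Nat) (x y dx dy sx sy cx cy tx ty : Int)
    (rem fuel : Nat) (d len d' len' : Nat)
    (hL : 1 ≤ L) (hlen : len = L) (hdir : dirsB d = (dx, dy)) (hfuel : rem ≤ fuel)
    (hsx : sx = x + dx) (hsy : sy = y + dy)
    (hcx : cx = x + L * dx) (hcy : cy = y + L * dy)
    (htx : tx = cx - dy) (hty : ty = cy + dx)
    (hd' : d' = (d + 1) % 4) (hlen' : len' = if d % 2 = 1 then len + 1 else len)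
    (hmid : ∀ i : Nat, 1 ≤ i → i < L → condA (x + i * dx) (y + i * dy) = false)
    (hend : condA cx cy = true)
    (htail : stepsA ox oy (rem - L) tx ty (-dy) dx =
      goB ox oy (rem - L) (rem - L) cx cy d' len') :
    stepsA ox oy rem sx sy dx dy = goB ox oy fuel rem x y d len := by
  subst hlen hsx hsy hcx hcy htx hty hd' hlen'
  cases fuel with
  | zero =>
    have h0 : rem = 0 := by omega
    subst h0
    simp [stepsA, goB]
  | succ f =>
    by_cases h0 : rem = 0
    · subst h0
      simp [stepsA, goB]
    · simp only [goB, if_neg h0, hdir]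
      rw [segA ox oy len x y dx dy rem hL hmid hend]
      by_cases hrL : rem ≤ len
      · have e2 : min len rem = rem := by omega
        have e1 : rem - len = 0 := by omega
        rw [e1] at *
        rw [e2, Nat.sub_self, goB_zero]
        simp [stepsA]
      · have e2 : min len rem = len := by omega
        rw [e2]
        simp only [runB_end]
        congr 1
        rw [goB_fuel ox oy (rem - len) f (rem - len) _ _ _ _ (by split <;> omega)
          (by omega) (le_refl _)]
        exact htail

-- the four-segment cycle starting at corner (-m, -m): strong induction on the remaining count
theorem mainCycle (ox oy : Int) : ∀ (rem : Nat) (m : Nat) (fuel : Nat), rem ≤ fuel →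
    stepsA ox oy rem (-(m : Int) + 1) (-(m : Int)) 1 0 =
      goB ox oy fuel rem (-(m : Int)) (-(m : Int)) 0 (2 * m + 1) := by
  intro rem
  induction rem using Nat.strong_induction_on with
  | _ rem ih =>
    intro m fuel hfuel
    by_cases h0 : rem = 0
    · subst h0
      simp [stepsA, goB_zero]
    · have hlt : rem - (2*m+1) - (2*m+1) - (2*m+2) - (2*m+2) < rem := by omega
      refine chainStep ox oy (2*m+1) (-(m : Int)) (-(m : Int)) 1 0
        (-(m : Int) + 1) (-(m : Int)) ((m : Int) + 1) (-(m : Int))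
        ((m : Int) + 1) (-(m : Int) + 1) rem fuel 0 (2*m+1) 1 (2*m+1)
        (by omega) rfl rfl hfuel (by ring) (by ring) (by push_cast; ring)
        (by push_cast; ring) (by ring) (by ring) (by norm_num) (by norm_num)
        (by intro i h1 h2; simp [condA]; omega) (by simp [condA]; try omega) ?_
      refine chainStep ox oy (2*m+1) ((m : Int) + 1) (-(m : Int)) 0 1
        ((m : Int) + 1) (-(m : Int) + 1) ((m : Int) + 1) ((m : Int) + 1)
        ((m : Int) + 1 + -1) ((m : Int) + 1) (rem - (2*m+1)) (rem - (2*m+1)) 1 (2*m+1)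
        2 (2*m+2)
        (by omega) rfl rfl (le_refl _) (by ring) (by ring) (by push_cast; ring)
        (by push_cast; ring) (by ring) (by ring) (by norm_num) (by norm_num)
        (by intro i h1 h2; simp [condA]; omega) (by simp [condA]; try omega) ?_
      refine chainStep ox oy (2*m+2) ((m : Int) + 1) ((m : Int) + 1) (-1) 0
        ((m : Int) + 1 + -1) ((m : Int) + 1) (-(m : Int) + -1) ((m : Int) + 1)
        (-(m : Int) + -1) ((m : Int) + 1 + -1) (rem - (2*m+1) - (2*m+1))
        (rem - (2*m+1) - (2*m+1)) 2 (2*m+2) 3 (2*m+2)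
        (by omega) rfl rfl (le_refl _) (by ring) (by ring) (by push_cast; ring)
        (by push_cast; ring) (by ring) (by ring) (by norm_num) (by norm_num)
        (by intro i h1 h2; simp [condA]; omega) (by simp [condA]; try omega) ?_
      refine chainStep ox oy (2*m+2) (-(m : Int) + -1) ((m : Int) + 1) 0 (-1)
        (-(m : Int) + -1) ((m : Int) + 1 + -1) (-(m : Int) + -1) (-(m : Int) + -1)
        (-((m : Nat) + 1 : Nat) + 1) (-((m : Nat) + 1 : Nat))
        (rem - (2*m+1) - (2*m+1) - (2*m+2)) (rem - (2*m+1) - (2*m+1) - (2*m+2))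
        3 (2*m+2) 0 (2*(m+1)+1)
        (by omega) rfl rfl (le_refl _) (by ring) (by ring) (by push_cast; ring)
        (by push_cast; ring) (by push_cast; ring) (by push_cast; ring)
        (by norm_num) (by norm_num; try omega)
        (by intro i h1 h2; simp [condA]; omega) (by simp [condA]; try omega) ?_
      have h4 := ih _ hlt (m + 1) _ (le_refl _)
      convert h4 using 2 <;> push_cast <;> ring

-- ===== VERDICT (by name: the statement is the Claim_ definition above) =====
theorem search_offset_spec : Claim_equal_search_offset := by
  intro radius ox oy _hdom
  unfold Spec_search_offset
  simp only [search_offset, search_offset_alt]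
  have hne : radius * 2 + 1 ≠ 0 := by omega
  have hpos : (1 : Int) ≤ (radius * 2 + 1) ^ 2 := by
    have h := mul_self_pos.mpr hne
    have : (radius * 2 + 1) ^ 2 = (radius * 2 + 1) * (radius * 2 + 1) := by ring
    omega
  have hn : 1 ≤ ((radius * 2 + 1) ^ 2).toNat := by omega
  obtain ⟨k, hk⟩ : ∃ k, ((radius * 2 + 1) ^ 2).toNat = k + 1 :=
    ⟨((radius * 2 + 1) ^ 2).toNat - 1, by omega⟩
  rw [hk]
  simp only [stepsA, Nat.add_sub_cancel]
  have hc : condA 0 0 = true := by decide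
  rw [hc]
  simp only [if_true]
  have hmc := mainCycle ox oy k 0 k (le_refl _)
  norm_num at hmc ⊢
  exact hmc
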